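-- pv_equiv track=rewrite | github.com/dangcpham/dangcpham.github.io | AstroSuperBot/coordinates.py | findwithcatalog
-- ===== SOURCE A (Python) =====
-- def findwithcatalog(name, catalog):
--     constellation = []
--     for i in range(len(catalog)):
--         if (name.lower() in catalog[i][0].lower()
--             or name.lower() in catalog[i][1].lower()):
--             return [catalog[i]]
--         if name.lower() in catalog[i][2].lower():
--             constellation.append(catalog[i])
--     return constellation
-- ===== SOURCE B (Python) =====
-- def findwithcatalog(name, catalog):
--     query = name.lower()
--     for row in catalog:
--         if query in row[0].lower() or query in row[1].lower():
--             return [row]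
--     return [row for row in catalog if query in row[2].lower()]
-- ===== Notes on version B (the rewrite author's own statement) =====
-- stated objective: simpler
-- what changed: Lowers the query once (A recomputes name.lower() up to four times per row) and splits A's single interleaved accumulate-and-early-return loop into two phases: a short-circuit search over fields 0/1, then a separate filter over field 2 (whose result A's discarded accumulator made equivalent).
import Mathlib
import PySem

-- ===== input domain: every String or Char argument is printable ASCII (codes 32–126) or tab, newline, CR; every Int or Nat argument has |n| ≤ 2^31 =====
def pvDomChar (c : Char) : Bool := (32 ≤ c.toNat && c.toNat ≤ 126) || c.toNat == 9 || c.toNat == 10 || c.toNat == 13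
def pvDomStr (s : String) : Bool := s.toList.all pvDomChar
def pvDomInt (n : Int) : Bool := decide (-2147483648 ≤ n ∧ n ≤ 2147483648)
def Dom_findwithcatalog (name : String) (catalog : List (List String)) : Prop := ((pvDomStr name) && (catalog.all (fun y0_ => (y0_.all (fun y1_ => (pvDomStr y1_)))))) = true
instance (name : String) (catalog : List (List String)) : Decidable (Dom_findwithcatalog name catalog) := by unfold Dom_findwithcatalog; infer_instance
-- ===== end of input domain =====

-- B lowers the query once and splits A's single interleaved loop into a short-circuit
-- search over fields 0/1 followed by a separate filter over field 2 (objective: simpler).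

-- row[k] ; total stand-in for Python's indexing — Pre_ guarantees the index is in range,
-- so inside Pre_ this is exact (Python raises IndexError exactly where pyGet? is none).
def pvRowGet (r : List String) (k : Int) : String := (PySem.List.pyGet? r k).getD ""

-- ===== PORT A =====
-- the 'for i in range(len(catalog))' loop of A, with the accumulator 'constellation'
def findwithcatalog_go (name : String) (acc : List (List String)) : List (List String) → List (List String)
  | [] => acc
  | r :: rest =>
    if PySem.Str.isIn (PySem.Str.lower name) (PySem.Str.lower (pvRowGet r 0)) ||
       PySem.Str.isIn (PySem.Str.lower name) (PySem.Str.lower (pvRowGet r 1)) then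
      [r]
    else if PySem.Str.isIn (PySem.Str.lower name) (PySem.Str.lower (pvRowGet r 2)) then
      findwithcatalog_go name (acc ++ [r]) rest
    else
      findwithcatalog_go name acc rest

def findwithcatalog (name : String) (catalog : List (List String)) : List (List String) :=
  findwithcatalog_go name [] catalog

-- ===== PORT B =====
-- first pass: short-circuit search over fields 0/1
def fwcFirst (query : String) : List (List String) → Option (List (List String))
  | [] => none
  | r :: rest =>
    if PySem.Str.isIn query (PySem.Str.lower (pvRowGet r 0)) ||
       PySem.Str.isIn query (PySem.Str.lower (pvRowGet r 1)) then
      some [r]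
    else
      fwcFirst query rest

def findwithcatalog_alt (name : String) (catalog : List (List String)) : List (List String) :=
  let query := PySem.Str.lower name
  match fwcFirst query catalog with
  | some res => res
  | none => catalog.filter (fun r => PySem.Str.isIn query (PySem.Str.lower (pvRowGet r 2)))

-- ===== PRECONDITION & SPEC =====
-- a row triggers A's early return (with Python's short-circuit field access: field 0,
-- then field 1, each only touched if the row is long enough)
def pvRowHit (q : String) (r : List String) : Bool :=
  (decide (1 ≤ r.length) && PySem.Str.isIn q (PySem.Str.lower (pvRowGet r 0))) ||
  (decide (2 ≤ r.length) && PySem.Str.isIn q (PySem.Str.lower (pvRowGet r 1)))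

-- Pre_ excludes exactly the inputs on which Python A raises IndexError: some row with
-- fewer than 3 fields is reached (i.e. lies before the first early-return match).
def Pre_findwithcatalog (name : String) (catalog : List (List String)) : Prop :=
  ∀ r ∈ catalog.takeWhile (fun r => !pvRowHit (PySem.Str.lower name) r), 3 ≤ r.length
instance (name : String) (catalog : List (List String)) : Decidable (Pre_findwithcatalog name catalog) := by unfold Pre_findwithcatalog; infer_instance

def pvWitness_findwithcatalog : String × List (List String) :=
  ("ori", [["Betelgeuse", "alpha Ori", "Orion"], ["Sirius", "alpha CMa", "Canis Major"]])

def Spec_findwithcatalog (name : String) (catalog : List (List String)) (out : List (List String)) : Prop := out = findwithcatalog_alt name catalog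
instance (name : String) (catalog : List (List String)) (out : List (List String)) : Decidable (Spec_findwithcatalog name catalog out) := by unfold Spec_findwithcatalog; infer_instance

-- ===== CLAIM (what is proved, stated in full; the proofs are below) =====
def Claim_equal_findwithcatalog : Prop := ∀ (name : String) (catalog : List (List String)), Dom_findwithcatalog name catalog → Pre_findwithcatalog name catalog → Spec_findwithcatalog name catalog (findwithcatalog name catalog)

-- ===== LEMMAS AND PROOFS =====

-- A's loop with accumulator acc equals: B's first-pass result if it finds a match,
-- otherwise acc followed by B's filter over field 2.
theorem fwc_go_eq (name : String) (rows acc : List (List String)) :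
    findwithcatalog_go name acc rows =
      match fwcFirst (PySem.Str.lower name) rows with
      | some res => res
      | none => acc ++ rows.filter
          (fun r => PySem.Str.isIn (PySem.Str.lower name) (PySem.Str.lower (pvRowGet r 2))) := by
  induction rows generalizing acc with
  | nil => simp [findwithcatalog_go, fwcFirst]
  | cons r rest ih =>
    simp only [findwithcatalog_go, fwcFirst]
    split_ifs with h1 h2
    · rfl
    · rw [ih, List.filter_cons, if_pos h2]
      cases fwcFirst (PySem.Str.lower name) rest <;> simp
    · rw [ih, List.filter_cons, if_neg h2]

-- ===== VERDICT (by name: the statement is the Claim_ definition above) =====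
theorem findwithcatalog_spec : Claim_equal_findwithcatalog := by
  intro name catalog _ _
  unfold Spec_findwithcatalog findwithcatalog findwithcatalog_alt
  rw [fwc_go_eq]
  cases h : fwcFirst (PySem.Str.lower name) catalog <;> simp [h]
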